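-- pv_equiv track=rewrite | github.com/joshanashakya/dissertation | workspace/dataset/java-python/GeeksForGeeks/909/A/2.py | find_con_zero
-- ===== SOURCE A (Python) =====
-- def two_factor( n ):
--
--     # Count number of 2s present in n
--     twocount = 0
--     while n % 2 == 0:
--         twocount+=1
--         n =int( n / 2)
--     return twocount
--
-- def five_factor( n ):
--     fivecount = 0
--     while n % 5 == 0:
--         fivecount+=1
--         n = int(n / 5)
--     return fivecount
--
-- def find_con_zero( arr, n ):
--     twocount = 0
--     fivecount = 0
--     for i in range(n):
--
--         # Count the two's factor of n number
--         twocount += two_factor(arr[i])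
--
--         # Count the five's factor of n number
--         fivecount += five_factor(arr[i])
--
--     # Return the minimum
--     if twocount < fivecount:
--         return twocount
--     else:
--         return fivecount
-- ===== SOURCE B (Python) =====
-- def find_con_zero(arr, n):
--     # Different algorithm: factor the single product of the first n elements
--     # instead of summing per-element factor counts.
--     p = 1
--     for i in range(n):
--         p *= arr[i]
--
--     def count_factors(k):
--         c = 0
--         q = p
--         while q % k == 0:
--             c += 1
--             q //= k
--         return c
--
--     twocount = count_factors(2)
--     fivecount = count_factors(5)
--     return twocount if twocount < fivecount else fivecount
-- ===== Notes on version B (the rewrite author's own statement) =====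
-- stated objective: alternative
-- what changed: B multiplies the first n elements into one product and then counts factors of 2 and of 5 of that single product with one generic division loop, instead of A's per-element pair of while-loops summed across the array.
import Mathlib
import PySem

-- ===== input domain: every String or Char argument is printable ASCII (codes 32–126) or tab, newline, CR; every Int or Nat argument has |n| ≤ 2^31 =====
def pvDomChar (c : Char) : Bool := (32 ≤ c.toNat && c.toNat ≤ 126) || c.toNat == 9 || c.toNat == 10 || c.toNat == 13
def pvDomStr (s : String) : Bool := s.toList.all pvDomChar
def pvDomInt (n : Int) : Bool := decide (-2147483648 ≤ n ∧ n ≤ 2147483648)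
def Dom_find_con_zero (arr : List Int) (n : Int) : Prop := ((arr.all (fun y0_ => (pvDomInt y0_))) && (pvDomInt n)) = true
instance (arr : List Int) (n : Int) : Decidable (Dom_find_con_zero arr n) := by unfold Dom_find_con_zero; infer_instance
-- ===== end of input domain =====

-- B differs from A by a different algorithm: one product, then factor that product once.
-- Equivalence is about the RETURN value; neither program mutates its arguments.

-- ===== PORT A =====
-- while n % 2 == 0: twocount += 1; n = int(n/2)  — int(n/2) is exact division here
-- (n is even, so n/2 is an exact float-representable integer on the |n| ≤ 2^31 domain);
-- the n ≠ 0 conjunct only makes the recursion total (Python loops forever on n = 0,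
-- excluded by Pre_).
def two_factor (n : Int) : Int :=
  if h : n ≠ 0 ∧ n % 2 = 0 then 1 + two_factor (n / 2) else 0
termination_by n.natAbs
decreasing_by
  rcases h with ⟨h0, h2⟩; omega

def five_factor (n : Int) : Int :=
  if h : n ≠ 0 ∧ n % 5 = 0 then 1 + five_factor (n / 5) else 0
termination_by n.natAbs
decreasing_by
  rcases h with ⟨h0, h5⟩; omega

def find_con_zero (arr : List Int) (n : Int) : Int :=
  -- for i in range(n): twocount += two_factor(arr[i]); fivecount += five_factor(arr[i])
  -- arr[i] is ported as pyGetD with default 0; Pre_ guarantees i is in range, so the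
  -- default is never used (Python raises IndexError outside Pre_).
  let st := (PySem.List.pyRange 0 n 1).foldl
    (fun (st : Int × Int) i =>
      (st.1 + two_factor (PySem.List.pyGetD arr i 0),
       st.2 + five_factor (PySem.List.pyGetD arr i 0))) (0, 0)
  if st.1 < st.2 then st.1 else st.2

-- ===== PORT B =====
-- while q % k == 0: c += 1; q //= k  — the 2 ≤ k ∧ q ≠ 0 conjuncts only make the
-- recursion total (Source B calls it with k ∈ {2,5}; q = 0 loops forever, excluded by Pre_).
def count_factors (k : Int) (q : Int) : Int :=
  if h : 2 ≤ k ∧ q ≠ 0 ∧ PySem.Int.mod q k = 0 then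
    1 + count_factors k (PySem.Int.floordiv q k)
  else 0
termination_by q.natAbs
decreasing_by
  rcases h with ⟨hk, h0, hm⟩
  rw [PySem.Int.mod_eq_emod_of_pos (by omega : (0:Int) < k)] at hm
  rw [PySem.Int.floordiv_eq_ediv_of_pos (by omega : (0:Int) < k)]
  obtain ⟨c, hc⟩ := Int.dvd_of_emod_eq_zero hm
  have hc0 : c ≠ 0 := by rintro rfl; omega
  have hq : q / k = c := by rw [hc]; exact Int.mul_ediv_cancel_left _ (by omega)
  rw [hq]
  have h1 : q.natAbs = k.natAbs * c.natAbs := by rw [hc]; exact Int.natAbs_mul _ _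
  have h2 : 2 * c.natAbs ≤ k.natAbs * c.natAbs :=
    Nat.mul_le_mul_right _ (by omega)
  omega

def find_con_zero_alt (arr : List Int) (n : Int) : Int :=
  let p := (PySem.List.pyRange 0 n 1).foldl
    (fun p i => p * PySem.List.pyGetD arr i 0) 1
  let twocount := count_factors 2 p
  let fivecount := count_factors 5 p
  if twocount < fivecount then twocount else fivecount

-- ===== PRECONDITION & SPEC =====
-- Pre_ excludes exactly the inputs on which A does not return: n > len(arr)
-- (IndexError) and a zero among the first n elements (two_factor(0) loops forever).
def Pre_find_con_zero (arr : List Int) (n : Int) : Prop :=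
  n ≤ arr.length ∧ ∀ x ∈ arr.take n.toNat, x ≠ 0
instance (arr : List Int) (n : Int) : Decidable (Pre_find_con_zero arr n) := by
  unfold Pre_find_con_zero; infer_instance

def pvWitness_find_con_zero : List Int × Int := ([2, 5, 10], 3)

def Spec_find_con_zero (arr : List Int) (n : Int) (out : Int) : Prop := out = find_con_zero_alt arr n
instance (arr : List Int) (n : Int) (out : Int) : Decidable (Spec_find_con_zero arr n out) := by unfold Spec_find_con_zero; infer_instance

-- ===== CLAIM (what is proved, stated in full; the proofs are below) =====
def Claim_equal_find_con_zero : Prop := ∀ (arr : List Int) (n : Int), Dom_find_con_zero arr n → Pre_find_con_zero arr n → Spec_find_con_zero arr n (find_con_zero arr n)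

-- ===== LEMMAS AND PROOFS =====
-- unfolding equations for the factor counters, phrased with divisibility
theorem two_factor_step (n : Int) (h0 : n ≠ 0) (hd : (2:Int) ∣ n) :
    two_factor n = 1 + two_factor (n / 2) := by
  rw [two_factor]; simp [h0, Int.emod_eq_zero_of_dvd hd]

theorem two_factor_stop (n : Int) (hd : ¬ (2:Int) ∣ n) :
    two_factor n = 0 := by
  rw [two_factor]
  exact dif_neg (by rintro ⟨-, h2⟩; exact hd (Int.dvd_of_emod_eq_zero h2))

theorem five_factor_step (n : Int) (h0 : n ≠ 0) (hd : (5:Int) ∣ n) :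
    five_factor n = 1 + five_factor (n / 5) := by
  rw [five_factor]; simp [h0, Int.emod_eq_zero_of_dvd hd]

theorem five_factor_stop (n : Int) (hd : ¬ (5:Int) ∣ n) :
    five_factor n = 0 := by
  rw [five_factor]
  exact dif_neg (by rintro ⟨-, h5⟩; exact hd (Int.dvd_of_emod_eq_zero h5))

theorem count_factors_step (k q : Int) (hk : 2 ≤ k) (h0 : q ≠ 0) (hd : k ∣ q) :
    count_factors k q = 1 + count_factors k (q / k) := by
  rw [count_factors.eq_def]
  rw [PySem.Int.mod_eq_emod_of_pos (by omega : (0:Int) < k),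
      PySem.Int.floordiv_eq_ediv_of_pos (by omega : (0:Int) < k)]
  simp [hk, h0, Int.emod_eq_zero_of_dvd hd]

theorem count_factors_stop (k q : Int) (hd : ¬ k ∣ q) :
    count_factors k q = 0 := by
  rw [count_factors.eq_def]
  refine dif_neg ?_
  rintro ⟨hk, -, hm⟩
  rw [PySem.Int.mod_eq_emod_of_pos (by omega : (0:Int) < k)] at hm
  exact hd (Int.dvd_of_emod_eq_zero hm)

-- A's per-element counters coincide with B's generic counter at k = 2 and k = 5
theorem two_factor_eq (n : Int) : two_factor n = count_factors 2 n := by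
  induction n using two_factor.induct with
  | case1 n h ih =>
    rcases h with ⟨h0, h2⟩
    rw [two_factor_step n h0 (Int.dvd_of_emod_eq_zero h2),
        count_factors_step 2 n le_rfl h0 (Int.dvd_of_emod_eq_zero h2), ih]
  | case2 n h =>
    rcases not_and_or.mp h with h0 | h2
    · have : n = 0 := by omega
      subst this
      rw [two_factor, count_factors.eq_def]
      simp [PySem.Int.mod]
    · rw [two_factor_stop n (fun hd => h2 (Int.emod_eq_zero_of_dvd hd)),
          count_factors_stop 2 n (fun hd => h2 (Int.emod_eq_zero_of_dvd hd))]

theorem five_factor_eq (n : Int) : five_factor n = count_factors 5 n := by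
  induction n using five_factor.induct with
  | case1 n h ih =>
    rcases h with ⟨h0, h5⟩
    rw [five_factor_step n h0 (Int.dvd_of_emod_eq_zero h5),
        count_factors_step 5 n (by norm_num) h0 (Int.dvd_of_emod_eq_zero h5), ih]
  | case2 n h =>
    rcases not_and_or.mp h with h0 | h5
    · have : n = 0 := by omega
      subst this
      rw [five_factor, count_factors.eq_def]
      simp [PySem.Int.mod]
    · rw [five_factor_stop n (fun hd => h5 (Int.emod_eq_zero_of_dvd hd)),
          count_factors_stop 5 n (fun hd => h5 (Int.emod_eq_zero_of_dvd hd))]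

-- multiplicativity of the counter for a prime k
theorem count_factors_mul (k : Int) (hk : 2 ≤ k) (hp : Prime k) :
    ∀ (m : Nat) (a b : Int), a.natAbs + b.natAbs ≤ m → a ≠ 0 → b ≠ 0 →
      count_factors k (a * b) = count_factors k a + count_factors k b := by
  intro m
  induction m with
  | zero => intro a b hm ha hb; omega
  | succ m ih =>
    intro a b hm ha hb
    have hk0 : k ≠ 0 := by omega
    by_cases hda : k ∣ a
    · obtain ⟨c, rfl⟩ := hda
      have hc : c ≠ 0 := by rintro rfl; simp at ha
      have h1 : k * c * b = k * (c * b) := by ring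
      rw [h1, count_factors_step k (k * (c * b)) hk
            (mul_ne_zero hk0 (mul_ne_zero hc hb)) ⟨c * b, rfl⟩,
          count_factors_step k (k * c) hk (mul_ne_zero hk0 hc) ⟨c, rfl⟩,
          Int.mul_ediv_cancel_left _ hk0, Int.mul_ediv_cancel_left _ hk0]
      have habs : (k * c).natAbs = k.natAbs * c.natAbs := Int.natAbs_mul k c
      have h2 : 2 * c.natAbs ≤ k.natAbs * c.natAbs :=
        Nat.mul_le_mul_right _ (by omega)
      rw [ih c b (by omega) hc hb]; ring
    · by_cases hdb : k ∣ b
      · obtain ⟨c, rfl⟩ := hdb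
        have hc : c ≠ 0 := by rintro rfl; simp at hb
        have h1 : a * (k * c) = k * (a * c) := by ring
        rw [h1, count_factors_step k (k * (a * c)) hk
              (mul_ne_zero hk0 (mul_ne_zero ha hc)) ⟨a * c, rfl⟩,
            count_factors_step k (k * c) hk (mul_ne_zero hk0 hc) ⟨c, rfl⟩,
            Int.mul_ediv_cancel_left _ hk0, Int.mul_ediv_cancel_left _ hk0]
        have habs : (k * c).natAbs = k.natAbs * c.natAbs := Int.natAbs_mul k c
        have h2 : 2 * c.natAbs ≤ k.natAbs * c.natAbs :=
          Nat.mul_le_mul_right _ (by omega)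
        rw [ih a c (by omega) ha hc]; ring
      · have hdab : ¬ k ∣ a * b := fun hd =>
          (hp.dvd_mul.mp hd).elim hda hdb
        rw [count_factors_stop k (a * b) hdab, count_factors_stop k a hda,
            count_factors_stop k b hdb]
        ring

theorem count_factors_one (k : Int) (hk : 2 ≤ k) : count_factors k 1 = 0 :=
  count_factors_stop k 1 (fun hd => by
    have := Int.le_of_dvd one_pos hd; omega)

-- counter of a product of nonzero elements = sum of the counters
theorem count_factors_prod (k : Int) (hk : 2 ≤ k) (hp : Prime k) :
    ∀ (xs : List Int), (∀ x ∈ xs, x ≠ 0) →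
      count_factors k xs.prod = (xs.map (count_factors k)).sum := by
  intro xs
  induction xs with
  | nil => intro _; simpa using count_factors_one k hk
  | cons x xs ih =>
    intro hnz
    have hx : x ≠ 0 := hnz x (by simp)
    have hxs : ∀ y ∈ xs, y ≠ 0 := fun y hy => hnz y (by simp [hy])
    have hprod : xs.prod ≠ 0 := List.prod_ne_zero (fun h0 => hxs 0 h0 rfl)
    rw [List.prod_cons,
        count_factors_mul k hk hp (x.natAbs + xs.prod.natAbs) x xs.prod le_rfl hx hprod,
        List.map_cons, List.sum_cons, ih hxs]

-- an index loop over range(m) with in-range accesses = a loop over the prefix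
theorem foldl_range_getD {β : Type} (arr : List Int) (f : β → Int → β) :
    ∀ (m : Nat) (init : β), m ≤ arr.length →
      (List.range m).foldl (fun s kk => f s (arr.getD kk 0)) init
        = (arr.take m).foldl f init := by
  intro m
  induction m with
  | zero => intro init _; simp
  | succ m ih =>
    intro init hm
    have hm' : m ≤ arr.length := by omega
    have hmem : m < arr.length := by omega
    rw [List.range_succ, List.foldl_append, ih init hm',
        List.take_add_one, List.foldl_append]
    simp [List.getD, List.getElem?_eq_getElem hmem]

-- both ports loop over range(n) reading arr[i]; reduce that to arr.take n.toNat
theorem foldl_pyRange_getD_take {β : Type} (arr : List Int) (n : Int)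
    (hn : n ≤ arr.length) (f : β → Int → β) (init : β) :
    (PySem.List.pyRange 0 n 1).foldl (fun s i => f s (PySem.List.pyGetD arr i 0)) init
      = (arr.take n.toNat).foldl f init := by
  rw [PySem.List.pyRange_one]
  simp only [List.foldl_map, zero_add, PySem.List.pyGetD_natCast]
  have hz : (n - 0).toNat = n.toNat := by omega
  rw [hz]
  exact foldl_range_getD arr f n.toNat init (by omega)

-- A's pair fold computes the two sums over the prefix
theorem a_fold_eq (xs : List Int) :
    ∀ (a b : Int),
      xs.foldl (fun (st : Int × Int) x =>
          (st.1 + two_factor x, st.2 + five_factor x)) (a, b)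
        = (a + (xs.map two_factor).sum, b + (xs.map five_factor).sum) := by
  induction xs with
  | nil => intro a b; simp
  | cons x xs ih =>
    intro a b
    simp only [List.foldl_cons, List.map_cons, List.sum_cons]
    rw [ih]
    simp only [Prod.mk.injEq]
    constructor <;> ring

-- ===== VERDICT (by name: the statement is the Claim_ definition above) =====
theorem find_con_zero_spec : Claim_equal_find_con_zero := by
  intro arr n _ hpre
  obtain ⟨hn, hnz⟩ := hpre
  unfold Spec_find_con_zero find_con_zero find_con_zero_alt
  have hA : (PySem.List.pyRange 0 n 1).foldl
      (fun (st : Int × Int) i =>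
        (st.1 + two_factor (PySem.List.pyGetD arr i 0),
         st.2 + five_factor (PySem.List.pyGetD arr i 0))) (0, 0)
      = (arr.take n.toNat).foldl
          (fun (st : Int × Int) x =>
            (st.1 + two_factor x, st.2 + five_factor x)) (0, 0) :=
    foldl_pyRange_getD_take arr n hn
      (fun (st : Int × Int) x => (st.1 + two_factor x, st.2 + five_factor x)) (0, 0)
  have hB : (PySem.List.pyRange 0 n 1).foldl
      (fun p i => p * PySem.List.pyGetD arr i 0) 1
      = (arr.take n.toNat).foldl (fun p x => p * x) 1 :=
    foldl_pyRange_getD_take arr n hn (fun p x => p * x) 1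
  rw [hA, hB]
  have hprod : (arr.take n.toNat).foldl (fun p x => p * x) 1
      = (arr.take n.toNat).prod := by
    rw [List.prod_eq_foldl]
  have hp2 := count_factors_prod 2 le_rfl Int.prime_two (arr.take n.toNat) hnz
  have hp5 := count_factors_prod 5 (by norm_num) (by norm_num) (arr.take n.toNat) hnz
  have h2 : (arr.take n.toNat).map two_factor
      = (arr.take n.toNat).map (count_factors 2) :=
    List.map_congr_left (fun x _ => two_factor_eq x)
  have h5 : (arr.take n.toNat).map five_factor
      = (arr.take n.toNat).map (count_factors 5) :=
    List.map_congr_left (fun x _ => five_factor_eq x)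
  simp only [a_fold_eq, hprod, hp2, hp5, h2, h5, zero_add]
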